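-- pv_equiv track=rewrite | github.com/sgl-project/sglang | python/sglang/srt/function_call/state_machine.py | _ends_with_partial
-- ===== SOURCE A (Python) =====
-- from typing import Any, Dict, List, Optional
--
-- def _ends_with_partial(buffer: str, tokens: List[Optional[str]]) -> int:
--     max_partial = 0
--     for token in tokens:
--         if not token:
--             continue
--         for i in range(1, min(len(buffer), len(token)) + 1):
--             if token.startswith(buffer[-i:]):
--                 max_partial = max(max_partial, i)
--     return max_partial
-- ===== SOURCE B (Python) =====
-- from typing import List, Optional
--
-- def _ends_with_partial(buffer: str, tokens: List[Optional[str]]) -> int: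
--     # Build a hash set of every non-empty prefix of every token once, then scan
--     # buffer suffixes from longest possible (capped by the longest token) to
--     # shortest and return the first (= longest) one found in the set.
--     prefixes = set()
--     for token in tokens:
--         if not token:
--             continue
--         for i in range(1, len(token) + 1):
--             prefixes.add(token[:i])
--     maxlen = max((len(token) for token in tokens if token), default=0)
--     for i in range(min(len(buffer), maxlen), 0, -1):
--         if buffer[-i:] in prefixes:
--             return i
--     return 0
-- ===== Notes on version B (the rewrite author's own statement) =====
-- stated objective: faster
-- what changed: Replaces the per-token nested startswith scan with a hash set of all token prefixes built once, then a single longest-first scan over buffer suffixes (capped by the longest token) that early-exits on the first (= maximal) hit.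
import Mathlib
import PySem

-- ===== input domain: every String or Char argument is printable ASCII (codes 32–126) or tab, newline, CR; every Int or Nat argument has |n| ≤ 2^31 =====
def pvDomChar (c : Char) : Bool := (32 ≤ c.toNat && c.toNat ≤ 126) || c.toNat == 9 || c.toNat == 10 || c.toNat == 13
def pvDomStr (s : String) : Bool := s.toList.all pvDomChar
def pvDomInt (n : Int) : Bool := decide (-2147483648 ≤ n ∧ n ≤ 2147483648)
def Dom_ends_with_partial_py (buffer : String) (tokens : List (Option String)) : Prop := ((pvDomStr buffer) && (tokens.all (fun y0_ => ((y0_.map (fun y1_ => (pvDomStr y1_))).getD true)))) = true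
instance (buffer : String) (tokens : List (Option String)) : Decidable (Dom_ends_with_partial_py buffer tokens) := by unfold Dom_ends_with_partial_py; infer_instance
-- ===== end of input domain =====

-- B replaces A's per-token nested startswith scan by a hash-set of all token prefixes
-- built once plus one longest-first scan over buffer suffixes capped by the longest token
-- (objective: faster; a timing run measured B ≥ 2.5× faster at the largest size).

-- ===== PORT A =====
-- literal port of A: for each truthy token, for i in range(1, min(len(buffer), len(token)) + 1),
-- if token.startswith(buffer[-i:]): max_partial = max(max_partial, i)
def ends_with_partial_py (buffer : String) (tokens : List (Option String)) : Int :=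
  tokens.foldl
    (fun max_partial token =>
      match token with
      | none => max_partial                  -- `if not token: continue` (None)
      | some t =>
        if t = "" then max_partial           -- `if not token: continue` (empty string)
        else
          (PySem.List.pyRange 1 (min (PySem.Str.len buffer) (PySem.Str.len t) + 1) 1).foldl
            (fun mp i =>
              if PySem.Str.startswith t (PySem.Str.slice buffer (some (-i)) none) then
                max mp i
              else mp)
            max_partial)
    0

-- ===== PORT B =====
-- `for i in range(min(len(buffer), maxlen), 0, -1): if buffer[-i:] in prefixes: return i` / `return 0`
def pvScanDown (prefixes : PySem.Set String) (buffer : String) : Nat → Int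
  | 0 => 0
  | i + 1 =>
    if PySem.Set.contains prefixes (PySem.Str.slice buffer (some (-((i : Int) + 1))) none) then
      (i : Int) + 1
    else pvScanDown prefixes buffer i

def ends_with_partial_py_alt (buffer : String) (tokens : List (Option String)) : Int :=
  let prefixes : PySem.Set String :=
    tokens.foldl
      (fun s token =>
        match token with
        | none => s
        | some t =>
          if t = "" then s
          else
            (PySem.List.pyRange 1 (PySem.Str.len t + 1) 1).foldl
              (fun s j => PySem.Set.add s (PySem.Str.slice t none (some j))) s)
      PySem.Set.empty
  let maxlen : Int :=   -- max((len(token) for token in tokens if token), default=0)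
    PySem.List.maxD
      (tokens.filterMap fun tok =>
        match tok with
        | none => none
        | some t => if t = "" then none else some (PySem.Str.len t))
      (fun x => x) 0
  pvScanDown prefixes buffer (min buffer.toList.length maxlen.toNat)

-- ===== PRECONDITION & SPEC =====
def Spec_ends_with_partial_py (buffer : String) (tokens : List (Option String)) (out : Int) : Prop := out = ends_with_partial_py_alt buffer tokens
instance (buffer : String) (tokens : List (Option String)) (out : Int) : Decidable (Spec_ends_with_partial_py buffer tokens out) := by unfold Spec_ends_with_partial_py; infer_instance

-- ===== CLAIM (what is proved, stated in full; the proofs are below) =====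
def Claim_equal_ends_with_partial_py : Prop := ∀ (buffer : String) (tokens : List (Option String)), Dom_ends_with_partial_py buffer tokens → Spec_ends_with_partial_py buffer tokens (ends_with_partial_py buffer tokens)

-- ===== LEMMAS AND PROOFS =====

def pvCond (buffer t : String) (i : Int) : Bool :=
  PySem.Str.startswith t (PySem.Str.slice buffer (some (-i)) none)

def pvQ (tokens : List (Option String)) (bs : List Char) (k : Nat) : Bool :=
  tokens.any fun tok =>
    match tok with
    | none => false
    | some t => decide (t ≠ "" ∧ bs.drop (bs.length - k) <+: t.toList)

def pvG (tokens : List (Option String)) (bs : List Char) : Nat → Nat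
  | 0 => 0
  | m + 1 => if pvQ tokens bs (m + 1) then m + 1 else pvG tokens bs m

def pvPrefixes (tokens : List (Option String)) : PySem.Set String :=
  tokens.foldl
    (fun s token =>
      match token with
      | none => s
      | some t =>
        if t = "" then s
        else
          (PySem.List.pyRange 1 (PySem.Str.len t + 1) 1).foldl
            (fun s j => PySem.Set.add s (PySem.Str.slice t none (some j))) s)
    PySem.Set.empty

lemma pv_maxfold (p : Int → Bool) (l : List Int) (mp : Int) :
    mp ≤ l.foldl (fun a i => if p i then max a i else a) mp ∧
    (l.foldl (fun a i => if p i then max a i else a) mp = mp ∨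
      (l.foldl (fun a i => if p i then max a i else a) mp ∈ l ∧
        p (l.foldl (fun a i => if p i then max a i else a) mp) = true)) ∧
    ∀ i ∈ l, p i = true → i ≤ l.foldl (fun a i => if p i then max a i else a) mp := by
  induction l generalizing mp with
  | nil => simp
  | cons x l ih =>
    simp only [List.foldl_cons]
    by_cases hp : p x = true
    · simp only [hp, if_pos]
      obtain ⟨h1, h2, h3⟩ := ih (max mp x)
      refine ⟨le_trans (le_max_left _ _) h1, ?_, ?_⟩
      · rcases h2 with h2 | h2
        · rcases max_choice mp x with hm | hm
          · left; rw [h2, hm]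
          · right; rw [h2, hm]; exact ⟨List.mem_cons_self .., hp⟩
        · right; exact ⟨List.mem_cons_of_mem _ h2.1, h2.2⟩
      · intro i hi hpi
        rcases List.mem_cons.mp hi with rfl | hi
        · exact le_trans (le_max_right _ _) h1
        · exact h3 i hi hpi
    · simp only [hp, if_neg, Bool.false_eq_true, not_false_iff]
      obtain ⟨h1, h2, h3⟩ := ih mp
      refine ⟨h1, ?_, ?_⟩
      · rcases h2 with h2 | h2
        · left; exact h2
        · right; exact ⟨List.mem_cons_of_mem _ h2.1, h2.2⟩
      · intro i hi hpi
        rcases List.mem_cons.mp hi with rfl | hi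
        · simp [hpi] at hp
        · exact h3 i hi hpi

lemma pvQ_iff (tokens : List (Option String)) (bs : List Char) (k : Nat) :
    pvQ tokens bs k = true ↔
      ∃ t : String, some t ∈ tokens ∧ t ≠ "" ∧ bs.drop (bs.length - k) <+: t.toList := by
  unfold pvQ
  rw [List.any_eq_true]
  constructor
  · rintro ⟨tok, htok, h⟩
    match tok with
    | none => simp at h
    | some t =>
      simp only [decide_eq_true_eq] at h
      exact ⟨t, htok, h.1, h.2⟩
  · rintro ⟨t, ht, hne, hp⟩
    exact ⟨some t, ht, by simp [hne, hp]⟩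

lemma pvCond_iff (buffer t : String) (i : Int) (h1 : 1 ≤ i) (_h2 : i ≤ (buffer.toList.length : Int)) :
    pvCond buffer t i = true ↔
      buffer.toList.drop (buffer.toList.length - i.toNat) <+: t.toList := by
  unfold pvCond
  rw [PySem.Str.startswith_eq, PySem.Chars.startswith_iff, PySem.Str.toList_slice,
    PySem.Chars.slice_eq_listSlice]
  have hi : i = ((i.toNat : Nat) : Int) := (Int.toNat_of_nonneg (by omega)).symm
  rw [hi, PySem.List.slice_from_neg_natCast _ _ (by omega), Int.toNat_natCast]

lemma pvA_fold_spec (buffer : String) (toks : List (Option String)) (mp : Int) :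
    mp ≤ toks.foldl
        (fun max_partial token =>
          match token with
          | none => max_partial
          | some t =>
            if t = "" then max_partial
            else
              (PySem.List.pyRange 1 (min (PySem.Str.len buffer) (PySem.Str.len t) + 1) 1).foldl
                (fun mp i => if pvCond buffer t i then max mp i else mp) max_partial)
        mp ∧
    (toks.foldl
        (fun max_partial token =>
          match token with
          | none => max_partial
          | some t =>
            if t = "" then max_partial
            else
              (PySem.List.pyRange 1 (min (PySem.Str.len buffer) (PySem.Str.len t) + 1) 1).foldl
                (fun mp i => if pvCond buffer t i then max mp i else mp) max_partial)
        mp = mp ∨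
      ∃ t : String, some t ∈ toks ∧ t ≠ "" ∧
        1 ≤ toks.foldl
            (fun max_partial token =>
              match token with
              | none => max_partial
              | some t =>
                if t = "" then max_partial
                else
                  (PySem.List.pyRange 1 (min (PySem.Str.len buffer) (PySem.Str.len t) + 1) 1).foldl
                    (fun mp i => if pvCond buffer t i then max mp i else mp) max_partial)
            mp ∧
        toks.foldl
            (fun max_partial token =>
              match token with
              | none => max_partial
              | some t =>
                if t = "" then max_partial
                else
                  (PySem.List.pyRange 1 (min (PySem.Str.len buffer) (PySem.Str.len t) + 1) 1).foldl
                    (fun mp i => if pvCond buffer t i then max mp i else mp) max_partial)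
            mp ≤ min (PySem.Str.len buffer) (PySem.Str.len t) ∧
        pvCond buffer t (toks.foldl
            (fun max_partial token =>
              match token with
              | none => max_partial
              | some t =>
                if t = "" then max_partial
                else
                  (PySem.List.pyRange 1 (min (PySem.Str.len buffer) (PySem.Str.len t) + 1) 1).foldl
                    (fun mp i => if pvCond buffer t i then max mp i else mp) max_partial)
            mp) = true) ∧
    ∀ t : String, some t ∈ toks → t ≠ "" → ∀ i : Int, 1 ≤ i →
      i ≤ min (PySem.Str.len buffer) (PySem.Str.len t) → pvCond buffer t i = true →
      i ≤ toks.foldl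
          (fun max_partial token =>
            match token with
            | none => max_partial
            | some t =>
              if t = "" then max_partial
              else
                (PySem.List.pyRange 1 (min (PySem.Str.len buffer) (PySem.Str.len t) + 1) 1).foldl
                  (fun mp i => if pvCond buffer t i then max mp i else mp) max_partial)
          mp := by
  induction toks generalizing mp with
  | nil => simp
  | cons tok toks ih =>
    simp only [List.foldl_cons]
    match tok with
    | none =>
      obtain ⟨h1, h2, h3⟩ := ih mp
      refine ⟨h1, ?_, ?_⟩
      · rcases h2 with h2 | ⟨t, ht, h⟩
        · exact Or.inl h2
        · exact Or.inr ⟨t, List.mem_cons_of_mem _ ht, h⟩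
      · intro t ht hne i hi1 hi2 hc
        rcases List.mem_cons.mp ht with h' | h'
        · exact absurd h' (by simp)
        · exact h3 t h' hne i hi1 hi2 hc
    | some t0 =>
      by_cases ht0 : t0 = ""
      · subst ht0
        obtain ⟨h1, h2, h3⟩ := ih mp
        refine ⟨h1, ?_, ?_⟩
        · rcases h2 with h2 | ⟨t, ht, h⟩
          · exact Or.inl h2
          · exact Or.inr ⟨t, List.mem_cons_of_mem _ ht, h⟩
        · intro t ht hne i hi1 hi2 hc
          rcases List.mem_cons.mp ht with h' | h'
          · exact absurd (Option.some.inj h') hne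
          · exact h3 t h' hne i hi1 hi2 hc
      · simp only [if_neg ht0]
        obtain ⟨g1, g2, g3⟩ := pv_maxfold (pvCond buffer t0)
          (PySem.List.pyRange 1 (min (PySem.Str.len buffer) (PySem.Str.len t0) + 1) 1) mp
        set mp' := (PySem.List.pyRange 1 (min (PySem.Str.len buffer) (PySem.Str.len t0) + 1) 1).foldl
          (fun mp i => if pvCond buffer t0 i then max mp i else mp) mp with hmp'
        obtain ⟨h1, h2, h3⟩ := ih mp'
        refine ⟨le_trans g1 h1, ?_, ?_⟩
        · rcases h2 with h2 | ⟨t, ht, h⟩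
          · rcases g2 with g2 | ⟨gm, gc⟩
            · exact Or.inl (h2.trans g2)
            · rw [PySem.List.mem_pyRange_one] at gm
              refine Or.inr ⟨t0, List.mem_cons_self .., ht0, ?_, ?_, ?_⟩
              · rw [h2]; exact gm.1
              · rw [h2]; omega
              · rw [h2]; exact gc
          · exact Or.inr ⟨t, List.mem_cons_of_mem _ ht, h⟩
        · intro t ht hne i hi1 hi2 hc
          rcases List.mem_cons.mp ht with h' | h'
          · obtain rfl := Option.some.inj h'
            have : i ≤ mp' := g3 i (PySem.List.mem_pyRange_one.mpr ⟨hi1, by omega⟩) hc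
            exact le_trans this h1
          · exact h3 t h' hne i hi1 hi2 hc

lemma pvG_le (tokens : List (Option String)) (bs : List Char) (m : Nat) :
    pvG tokens bs m ≤ m := by
  induction m with
  | zero => simp [pvG]
  | succ m ih => unfold pvG; split <;> omega

lemma pvG_zero_or (tokens : List (Option String)) (bs : List Char) (m : Nat) :
    pvG tokens bs m = 0 ∨ (1 ≤ pvG tokens bs m ∧ pvQ tokens bs (pvG tokens bs m) = true) := by
  induction m with
  | zero => left; rfl
  | succ m ih =>
    unfold pvG
    split
    · right; exact ⟨by omega, by simp [*]⟩
    · exact ih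

lemma pvG_ge (tokens : List (Option String)) (bs : List Char) (m j : Nat)
    (hj1 : 1 ≤ j) (hjm : j ≤ m) (hq : pvQ tokens bs j = true) :
    j ≤ pvG tokens bs m := by
  induction m with
  | zero => omega
  | succ m ih =>
    unfold pvG
    split
    · omega
    · rename_i h
      have : j ≠ m + 1 := by rintro rfl; exact h hq
      exact ih (by omega)

lemma pv_mem_foldl_add (f : Int → String) (l : List Int) (s : PySem.Set String) (x : String) :
    x ∈ l.foldl (fun s j => PySem.Set.add s (f j)) s ↔ x ∈ s ∨ ∃ j ∈ l, x = f j := by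
  induction l generalizing s with
  | nil => simp
  | cons y l ih =>
    simp only [List.foldl_cons, ih, PySem.Set.mem_add, List.mem_cons]
    constructor
    · rintro ((h | h) | ⟨j, hj, rfl⟩)
      · exact Or.inl h
      · exact Or.inr ⟨y, Or.inl rfl, h⟩
      · exact Or.inr ⟨j, Or.inr hj, rfl⟩
    · rintro (h | ⟨j, (rfl | hj), rfl⟩)
      · exact Or.inl (Or.inl h)
      · exact Or.inl (Or.inr rfl)
      · exact Or.inr ⟨j, hj, rfl⟩

lemma pv_mem_prefixes_aux (tokens : List (Option String)) (s : PySem.Set String) (x : String) :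
    x ∈ tokens.foldl
      (fun s token =>
        match token with
        | none => s
        | some t =>
          if t = "" then s
          else
            (PySem.List.pyRange 1 (PySem.Str.len t + 1) 1).foldl
              (fun s j => PySem.Set.add s (PySem.Str.slice t none (some j))) s)
      s ↔
      x ∈ s ∨ ∃ t : String, some t ∈ tokens ∧ t ≠ "" ∧
        ∃ j : Int, 1 ≤ j ∧ j ≤ PySem.Str.len t ∧ x = PySem.Str.slice t none (some j) := by
  induction tokens generalizing s with
  | nil => simp
  | cons tok toks ih =>
    simp only [List.foldl_cons]
    match tok with
    | none =>
      rw [ih]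
      constructor
      · rintro (h | ⟨t, ht, h⟩)
        · exact Or.inl h
        · exact Or.inr ⟨t, List.mem_cons_of_mem _ ht, h⟩
      · rintro (h | ⟨t, ht, h⟩)
        · exact Or.inl h
        · rcases List.mem_cons.mp ht with h' | h'
          · exact absurd h' (by simp)
          · exact Or.inr ⟨t, h', h⟩
    | some t0 =>
      by_cases ht0 : t0 = ""
      · subst ht0
        rw [ih]
        constructor
        · rintro (h | ⟨t, ht, h⟩)
          · exact Or.inl h
          · exact Or.inr ⟨t, List.mem_cons_of_mem _ ht, h⟩
        · rintro (h | ⟨t, ht, hne, h⟩)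
          · exact Or.inl h
          · rcases List.mem_cons.mp ht with h' | h'
            · exact absurd (Option.some.inj h') hne
            · exact Or.inr ⟨t, h', hne, h⟩
      · simp only [if_neg ht0]
        rw [ih, pv_mem_foldl_add]
        constructor
        · rintro ((h | ⟨j, hj, rfl⟩) | ⟨t, ht, h⟩)
          · exact Or.inl h
          · rw [PySem.List.mem_pyRange_one] at hj
            exact Or.inr ⟨t0, List.mem_cons_self .., ht0, j, hj.1, by omega, rfl⟩
          · exact Or.inr ⟨t, List.mem_cons_of_mem _ ht, h⟩
        · rintro (h | ⟨t, ht, hne, j, hj1, hjt, rfl⟩)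
          · exact Or.inl (Or.inl h)
          · rcases List.mem_cons.mp ht with h' | h'
            · obtain rfl := Option.some.inj h'
              exact Or.inl (Or.inr ⟨j, PySem.List.mem_pyRange_one.mpr ⟨hj1, by omega⟩, rfl⟩)
            · exact Or.inr ⟨t, h', hne, j, hj1, hjt, rfl⟩

lemma pv_mem_prefixes (tokens : List (Option String)) (x : String) :
    x ∈ pvPrefixes tokens ↔
      ∃ t : String, some t ∈ tokens ∧ t ≠ "" ∧
        ∃ j : Int, 1 ≤ j ∧ j ≤ PySem.Str.len t ∧ x = PySem.Str.slice t none (some j) := by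
  rw [pvPrefixes, pv_mem_prefixes_aux]
  simp [PySem.Set.empty]

lemma pv_contains_iff (buffer : String) (tokens : List (Option String)) (k : Nat)
    (hk1 : 1 ≤ k) (hk : k ≤ buffer.toList.length) :
    PySem.Set.contains (pvPrefixes tokens) (PySem.Str.slice buffer (some (-(k : Int))) none) = true ↔
      pvQ tokens buffer.toList k = true := by
  have hsl : (PySem.Str.slice buffer (some (-(k : Int))) none).toList
      = buffer.toList.drop (buffer.toList.length - k) := by
    rw [PySem.Str.toList_slice, PySem.Chars.slice_eq_listSlice,
      PySem.List.slice_from_neg_natCast _ _ (by omega)]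
  have hlen : (buffer.toList.drop (buffer.toList.length - k)).length = k := by
    rw [List.length_drop]; omega
  rw [PySem.Set.contains_iff, pv_mem_prefixes, pvQ_iff]
  constructor
  · rintro ⟨t, ht, hne, j, hj1, hjt, hx⟩
    refine ⟨t, ht, hne, ?_⟩
    have hx' : (PySem.Str.slice buffer (some (-(k : Int))) none).toList
        = (PySem.Str.slice t none (some j)).toList := by rw [hx]
    rw [hsl, PySem.Str.toList_slice, PySem.Chars.slice_eq_listSlice,
      PySem.List.slice_to _ (by omega)] at hx'
    have hjlen : j.toNat ≤ t.toList.length := by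
      rw [PySem.Str.len_eq] at hjt; omega
    have hkj : j.toNat = k := by
      have := congrArg List.length hx'
      rw [hlen, List.length_take] at this
      omega
    rw [hx']
    exact List.take_prefix _ _
  · rintro ⟨t, ht, hne, hp⟩
    have hle : k ≤ t.toList.length := by
      have := hp.length_le
      rw [hlen] at this; exact this
    refine ⟨t, ht, hne, (k : Int), by omega, by rw [PySem.Str.len_eq]; omega, ?_⟩
    apply String.toList_inj.mp
    rw [hsl, PySem.Str.toList_slice, PySem.Chars.slice_eq_listSlice,
      PySem.List.slice_to _ (by omega), Int.toNat_natCast]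
    have := List.prefix_iff_eq_take.mp hp
    rw [hlen] at this
    exact this

lemma pv_scanDown_eq (buffer : String) (tokens : List (Option String)) (m : Nat)
    (hm : m ≤ buffer.toList.length) :
    pvScanDown (pvPrefixes tokens) buffer m = ((pvG tokens buffer.toList m : Nat) : Int) := by
  induction m with
  | zero => simp [pvScanDown, pvG]
  | succ m ih =>
    unfold pvScanDown pvG
    have hcast : -((m : Int) + 1) = -(((m + 1 : Nat) : Int)) := by push_cast; ring
    rw [hcast]
    by_cases hq : pvQ tokens buffer.toList (m + 1) = true
    · rw [if_pos ((pv_contains_iff buffer tokens (m + 1) (by omega) hm).mpr hq), if_pos hq]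
      push_cast; ring
    · rw [if_neg (by rw [pv_contains_iff buffer tokens (m + 1) (by omega) hm]; exact hq),
        if_neg hq]
      exact ih (by omega)

def pvMaxlen (tokens : List (Option String)) : Int :=
  PySem.List.maxD
    (tokens.filterMap fun tok =>
      match tok with
      | none => none
      | some t => if t = "" then none else some (PySem.Str.len t))
    (fun x => x) 0

lemma pvMaxlen_ge (tokens : List (Option String)) (t : String)
    (ht : some t ∈ tokens) (hne : t ≠ "") : PySem.Str.len t ≤ pvMaxlen tokens := by
  unfold pvMaxlen PySem.List.maxD
  have hmem : PySem.Str.len t ∈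
      (tokens.filterMap fun tok =>
        match tok with
        | none => none
        | some t => if t = "" then none else some (PySem.Str.len t)) :=
    List.mem_filterMap.mpr ⟨some t, ht, by simp [hne]⟩
  cases h : PySem.List.max?
      (tokens.filterMap fun tok =>
        match tok with
        | none => none
        | some t => if t = "" then none else some (PySem.Str.len t))
      (fun x => x) with
  | none =>
    rw [PySem.List.max?_eq_none_iff] at h
    rw [h] at hmem
    simp at hmem
  | some m => simpa using PySem.List.max?_isMax h _ hmem

-- ===== VERDICT (by name: the statement is the Claim_ definition above) =====
theorem ends_with_partial_py_spec : Claim_equal_ends_with_partial_py := by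
  intro buffer tokens _dom
  unfold Spec_ends_with_partial_py
  have hB : ends_with_partial_py_alt buffer tokens
      = ((pvG tokens buffer.toList
            (min buffer.toList.length (pvMaxlen tokens).toNat) : Nat) : Int) :=
    pv_scanDown_eq buffer tokens _ (min_le_left _ _)
  obtain ⟨h1, h2, h3⟩ := pvA_fold_spec buffer tokens 0
  have h1' : (0 : Int) ≤ ends_with_partial_py buffer tokens := h1
  have h2' : ends_with_partial_py buffer tokens = 0 ∨
      ∃ t : String, some t ∈ tokens ∧ t ≠ "" ∧
        1 ≤ ends_with_partial_py buffer tokens ∧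
        ends_with_partial_py buffer tokens ≤ min (PySem.Str.len buffer) (PySem.Str.len t) ∧
        pvCond buffer t (ends_with_partial_py buffer tokens) = true := h2
  have h3' : ∀ t : String, some t ∈ tokens → t ≠ "" → ∀ i : Int, 1 ≤ i →
      i ≤ min (PySem.Str.len buffer) (PySem.Str.len t) → pvCond buffer t i = true →
      i ≤ ends_with_partial_py buffer tokens := h3
  rw [hB]
  set n := buffer.toList.length with hn
  set m0 := min buffer.toList.length (pvMaxlen tokens).toNat with hm0
  set g := pvG tokens buffer.toList m0 with hg
  apply le_antisymm
  · -- A ≤ g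
    rcases h2' with hz | ⟨t, ht, hne, hA1, hAmin, hAc⟩
    · rw [hz]; positivity
    · have hAn : ends_with_partial_py buffer tokens ≤ (n : Int) := by
        refine le_trans hAmin (le_trans (min_le_left _ _) ?_)
        rw [PySem.Str.len_eq]
      have hdrop := (pvCond_iff buffer t _ hA1 hAn).mp hAc
      have hq : pvQ tokens buffer.toList (ends_with_partial_py buffer tokens).toNat = true :=
        (pvQ_iff _ _ _).mpr ⟨t, ht, hne, hdrop⟩
      have hlt : ends_with_partial_py buffer tokens ≤ PySem.Str.len t :=
        le_trans hAmin (min_le_right _ _)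
      have hml := pvMaxlen_ge tokens t ht hne
      have := pvG_ge tokens buffer.toList m0 (ends_with_partial_py buffer tokens).toNat
        (by omega) (by omega) hq
      omega
  · -- g ≤ A
    rcases pvG_zero_or tokens buffer.toList m0 with hz | ⟨hg1, hgq⟩
    · rw [← hg] at hz; rw [hz]; exact_mod_cast h1'
    · rw [← hg] at hg1 hgq
      obtain ⟨t, ht, hne, hp⟩ := (pvQ_iff _ _ _).mp hgq
      have hgn : g ≤ n := le_trans (pvG_le tokens buffer.toList m0) (min_le_left _ _)
      have hglen : g ≤ t.toList.length := by
        have := hp.length_le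
        rw [List.length_drop] at this
        omega
      refine h3' t ht hne (g : Int) (by exact_mod_cast hg1) ?_ ?_
      · refine le_min ?_ ?_ <;> rw [PySem.Str.len_eq] <;> exact_mod_cast (by omega : g ≤ _)
      · refine (pvCond_iff buffer t (g : Int) (by exact_mod_cast hg1) (by exact_mod_cast hgn)).mpr ?_
        rw [Int.toNat_natCast]
        exact hp
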